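-- pv_equiv track=rewrite | github.com/AdamZhouSE/pythonHomework | Code/CodeRecords/2737/60837/267771.py | Func
-- ===== SOURCE A (Python) =====
-- def Func(List):
--     threshold=int(len(List)/3)+1
--     result=[]
--     count=0
--     thisNum=List[0]
--     for i in range(len(List)):
--         if List[i]==thisNum:
--             count+=1
--         else:
--             thisNum=List[i]
--             count=1
--         if count>=threshold:
--             result.append(thisNum)
--             count=0
--     return result
-- ===== SOURCE B (Python) =====
-- def Func(List):
--     threshold = len(List) // 3 + 1
--     result = []
--     i = 0
--     n = len(List)
--     while i < n:
--         j = i + 1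
--         while j < n and List[j] == List[i]:
--             j += 1
--         result.extend([List[i]] * ((j - i) // threshold))
--         i = j
--     return result
-- ===== Notes on version B (the rewrite author's own statement) =====
-- stated objective: alternative
-- what changed: B splits the input into maximal runs of equal values and emits each value floor(run_length/threshold) times at once, replacing A's element-by-element counter with reset-on-emit.
-- crash fix: On the empty list A raises IndexError (it reads List[0]); B returns []. — e.g. on Func([]): A raises IndexError, B returns []
import Mathlib
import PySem

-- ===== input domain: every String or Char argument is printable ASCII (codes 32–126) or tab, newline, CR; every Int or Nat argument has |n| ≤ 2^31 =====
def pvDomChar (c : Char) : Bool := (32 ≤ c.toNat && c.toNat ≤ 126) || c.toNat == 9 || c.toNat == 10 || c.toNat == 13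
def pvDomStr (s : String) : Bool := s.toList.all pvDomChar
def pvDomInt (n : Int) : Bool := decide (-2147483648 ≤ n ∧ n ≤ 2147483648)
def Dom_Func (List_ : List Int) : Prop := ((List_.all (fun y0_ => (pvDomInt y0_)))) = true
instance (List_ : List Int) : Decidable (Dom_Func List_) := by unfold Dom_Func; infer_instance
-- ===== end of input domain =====

-- B splits the input into maximal runs and emits each value (run length // threshold)
-- times at once, replacing A's per-element counter with reset-on-emit; same cost.

-- ===== PORT A =====
def funcStep (threshold : Int) (s : List Int × Int × Int) (x : Int) : List Int × Int × Int :=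
  let p := if x = s.2.2 then (s.2.1 + 1, s.2.2) else ((1 : Int), x)
  if p.1 ≥ threshold then (s.1 ++ [p.2], 0, p.2) else (s.1, p.1, p.2)

def Func (List_ : List Int) : List Int :=
  match List_ with
  | [] => []    -- unreachable under Pre_Func: Python raises IndexError at List[0]
  | h :: _ =>
    let threshold := PySem.Int.floordiv ((List_.length : Int)) 3 + 1
    (List_.foldl (funcStep threshold) ([], 0, h)).1

-- ===== PORT B =====
-- the maximal runs of equal consecutive values, as (value, run length) pairs
-- (the outer while over `rest`; the inner while computes one run's length)
def pyRuns : List Int → List (Int × Nat)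
  | [] => []
  | v :: t => (v, 1 + (t.takeWhile (· = v)).length) :: pyRuns (t.dropWhile (· = v))
termination_by l => l.length
decreasing_by simpa using Nat.lt_succ_of_le (List.length_dropWhile_le _ _)

def Func_alt (List_ : List Int) : List Int :=
  let threshold := PySem.Int.floordiv ((List_.length : Int)) 3 + 1
  (pyRuns List_).flatMap (fun p =>
    List.replicate (PySem.Int.floordiv ((p.2 : Int)) threshold).toNat p.1)

-- ===== PRECONDITION & SPEC =====
-- Pre_ excludes only the empty list, on which Python A raises IndexError (List[0]).
def Pre_Func (List_ : List Int) : Prop := List_ ≠ []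
instance (List_ : List Int) : Decidable (Pre_Func List_) := by unfold Pre_Func; infer_instance
def pvWitness_Func : List Int := ([1, 1, 2])

-- On the empty list A raises IndexError (it reads List[0]); B returns [].
def Raises_Func (List_ : List Int) : Prop := List_ = []
instance (List_ : List Int) : Decidable (Raises_Func List_) := by unfold Raises_Func; infer_instance
def pvRaiseWitness_Func : List Int := ([])
def pvRaiseWitnessOut_Func : List Int := []

def Spec_Func (List_ : List Int) (out : List Int) : Prop := out = Func_alt List_
instance (List_ : List Int) (out : List Int) : Decidable (Spec_Func List_ out) := by unfold Spec_Func; infer_instance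

-- ===== CLAIM (what is proved, stated in full; the proofs are below) =====
def Claim_equal_Func : Prop := ∀ (List_ : List Int), Dom_Func List_ → Pre_Func List_ → Spec_Func List_ (Func List_)
def Claim_raises_Func : Prop := (∀ (List_ : List Int), Dom_Func List_ → Raises_Func List_ → ¬ Pre_Func List_) ∧ (Dom_Func (pvRaiseWitness_Func) ∧ Raises_Func (pvRaiseWitness_Func) ∧ Func_alt (pvRaiseWitness_Func) = pvRaiseWitnessOut_Func)

-- ===== LEMMAS AND PROOFS =====

-- Processing a run of copies of v from a state already at thisNum = v, count = c < T:
-- the run emits v every T elements, ending with count = (c + |r|) % T.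
theorem fold_run (T : Nat) (hT : 1 ≤ T) (v : Int) (r : List Int) (hr : ∀ x ∈ r, x = v)
    (res : List Int) (c : Nat) (hc : c < T) :
    r.foldl (funcStep (T : Int)) (res, (c : Int), v) =
      (res ++ List.replicate ((c + r.length) / T) v, (((c + r.length) % T : Nat) : Int), v) := by
  induction r generalizing res c with
  | nil =>
    simp [Nat.div_eq_of_lt hc, Nat.mod_eq_of_lt hc]
  | cons x r' ih =>
    have hx : x = v := hr x (by simp)
    have hr' : ∀ y ∈ r', y = v := fun y hy => hr y (by simp [hy])
    subst hx
    by_cases hcT : c + 1 = T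
    · have hstep : funcStep (T : Int) (res, (c : Int), x) x = (res ++ [x], 0, x) := by
        simp only [funcStep]
        simp [show ((c : Int) + 1 ≥ (T : Int)) from by omega]
      rw [List.foldl_cons, hstep]
      have h0 : ((0 : Int)) = (((0 : Nat)) : Int) := by norm_num
      rw [h0, ih hr' (res ++ [x]) 0 hT]
      simp only [List.length_cons, Nat.zero_add]
      rw [show c + (r'.length + 1) = r'.length + T from by omega,
        Nat.add_div_right _ (by omega : 0 < T), Nat.add_mod_right]
      simp [List.replicate_succ, List.append_assoc]
    · have hcT' : c + 1 < T := by omega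
      have hstep : funcStep (T : Int) (res, (c : Int), x) x = (res, (c : Int) + 1, x) := by
        simp only [funcStep]
        simp [show ¬ ((c : Int) + 1 ≥ (T : Int)) from by omega]
      rw [List.foldl_cons, hstep]
      have h1 : ((c : Int) + 1) = (((c + 1 : Nat)) : Int) := by push_cast; ring
      rw [h1, ih hr' res (c + 1) hcT']
      simp only [List.length_cons]
      rw [show c + 1 + r'.length = c + (r'.length + 1) from by omega]

-- head of dropWhile fails the predicate
theorem dropWhile_head_ne (v : Int) : ∀ (t : List Int) (h : Int) (t' : List Int),
    t.dropWhile (· = v) = h :: t' → h ≠ v := by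
  intro t
  induction t with
  | nil => intro h t' hEq; simp at hEq
  | cons a t ih =>
    intro h t' hEq
    by_cases hav : a = v
    · rw [List.dropWhile_cons_of_pos (by simp [hav])] at hEq
      exact ih h t' hEq
    · rw [List.dropWhile_cons_of_neg (by simp [hav])] at hEq
      intro hhv
      exact hav (by cases hEq; omega)

-- The main loop invariant: from a state whose counter restarts cleanly at the head
-- of l, A's fold appends exactly B's run-wise output.
theorem fold_main (T : Nat) (hT : 1 ≤ T) :
    ∀ (n : Nat) (l : List Int), l.length ≤ n →
    ∀ (res : List Int) (c : Nat) (v : Int), c < T →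
    (∀ h t, l = h :: t → (v ≠ h ∨ (c = 0 ∧ v = h))) →
    (l.foldl (funcStep (T : Int)) (res, (c : Int), v)).1 =
      res ++ (pyRuns l).flatMap (fun p => List.replicate (p.2 / T) p.1) := by
  intro n
  induction n with
  | zero =>
    intro l hl
    have : l = [] := List.length_eq_zero_iff.mp (Nat.le_zero.mp hl)
    subst this
    intro res c v _ _
    simp [pyRuns]
  | succ n ih =>
    intro l hl res c v hc hstart
    match l with
    | [] => simp [pyRuns]
    | h :: t =>
      -- split off the first maximal run
      have hsplit : h :: t = (h :: t.takeWhile (· = h)) ++ t.dropWhile (· = h) := by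
        simp [List.takeWhile_append_dropWhile]
      rw [hsplit, List.foldl_append]
      -- first step is the same as from a clean (count 0, thisNum h) state
      have hfirst : funcStep (T : Int) (res, (c : Int), v) h
          = funcStep (T : Int) (res, ((0 : Nat) : Int), h) h := by
        rcases hstart h t rfl with hne | ⟨hc0, hvh⟩
        · simp only [funcStep]
          have : ¬ (h = v) := fun hh => hne hh.symm
          simp [this]
        · subst hvh; subst hc0; rfl
      rw [List.foldl_cons, hfirst, ← List.foldl_cons]
      have hrun : ∀ x ∈ h :: t.takeWhile (· = h), x = h := by
        intro x hx
        rcases List.mem_cons.mp hx with hx | hx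
        · exact hx
        · simpa using List.mem_takeWhile_imp hx
      rw [fold_run T hT h _ hrun res 0 hT]
      have hlen : (t.dropWhile (· = h)).length ≤ n := by
        have h1 := List.length_dropWhile_le (· = h) t
        simp at hl; omega
      have hmod : (0 + (h :: t.takeWhile (· = h)).length) % T < T := Nat.mod_lt _ (by omega)
      rw [ih (t.dropWhile (· = h)) hlen _ _ h hmod
        (by intro h' t' hEq; exact Or.inl (fun hhh => dropWhile_head_ne h t h' t' hEq hhh.symm))]
      rw [← hsplit]
      -- assemble: pyRuns (h :: t) = (h, 1 + |takeWhile|) :: pyRuns (dropWhile)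
      rw [show pyRuns (h :: t) = (h, 1 + (t.takeWhile (· = h)).length) :: pyRuns (t.dropWhile (· = h)) from by rw [pyRuns]]
      simp [List.flatMap_cons, Nat.add_comm 1]

theorem floordiv_toNat (m k : Nat) : (PySem.Int.floordiv ((m : Int)) ((k : Int))).toNat = m / k := by
  rw [PySem.Int.floordiv_natCast]
  exact Int.toNat_natCast _

theorem threshold_eq (m : Nat) :
    PySem.Int.floordiv ((m : Int)) 3 + 1 = (((m / 3 + 1 : Nat)) : Int) := by
  rw [show (3 : Int) = ((3 : Nat) : Int) from by norm_num, PySem.Int.floordiv_natCast]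
  push_cast
  ring

-- ===== VERDICT (by name: the statement is the Claim_ definition above) =====
theorem Func_spec : Claim_equal_Func := by
  intro List_ _ hpre
  unfold Spec_Func
  match List_ with
  | [] => exact absurd rfl hpre
  | h :: t =>
    set T : Nat := (h :: t).length / 3 + 1 with hTdef
    have hT : 1 ≤ T := by omega
    have hth : PySem.Int.floordiv (((h :: t).length : Int)) 3 + 1 = ((T : Nat) : Int) := by
      rw [threshold_eq]
    show (Func (h :: t)) = Func_alt (h :: t)
    unfold Func Func_alt
    simp only [hth]
    have h0 : ((0 : Int)) = (((0 : Nat)) : Int) := by norm_num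
    rw [h0, fold_main T hT ((h :: t).length) (h :: t) le_rfl [] 0 h hT
      (by intro h' t' hEq; cases hEq; exact Or.inr ⟨rfl, rfl⟩)]
    simp only [List.nil_append]
    have hfun : (fun (p : Int × Nat) =>
        List.replicate ((PySem.Int.floordiv ((p.2 : Int)) ((T : Nat) : Int)).toNat) p.1)
        = (fun (p : Int × Nat) => List.replicate (p.2 / T) p.1) := by
      funext p
      rw [floordiv_toNat]
    rw [hfun]

@[simp] theorem Func_raises : Claim_raises_Func := by
  unfold Claim_raises_Func
  refine ⟨fun L _ hR hP => hP hR, by decide, by decide, ?_⟩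
  simp [Func_alt, pvRaiseWitness_Func, pvRaiseWitnessOut_Func, pyRuns]
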